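-- pv_equiv track=rewrite | github.com/MylesJP/packastack | src/packastack/planning/targets.py | detect_shell_expansion
-- ===== SOURCE A (Python) =====
-- from collections.abc import Iterable, Sequence
--
-- def detect_shell_expansion(raw_args: Sequence[str]) -> bool:
--     """Detect likely unintended shell glob expansion.
--
--     Heuristic:
--     - multiple positional args
--     - none contain ^ or ~ or a scope prefix
--     - they share a common prefix
--     """
--
--     if len(raw_args) < 2:
--         return False
--
--     cleaned = [arg for arg in raw_args if arg]
--     if any("^" in arg or "~" in arg or ":" in arg for arg in cleaned):
--         return False
--
--     prefix = _common_prefix(cleaned)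
--     return bool(prefix and len(prefix) >= 2)
--
-- def _common_prefix(values: Sequence[str]) -> str:
--     """Compute common prefix for a sequence of strings."""
--
--     if not values:
--         return ""
--     prefix = values[0]
--     for val in values[1:]:
--         while not val.startswith(prefix) and prefix:
--             prefix = prefix[:-1]
--         if not prefix:
--             break
--     return prefix
-- ===== SOURCE B (Python) =====
-- def detect_shell_expansion(raw_args):
--     if len(raw_args) < 2:
--         return False
--     cleaned = [arg for arg in raw_args if arg]
--     if any("^" in arg or "~" in arg or ":" in arg for arg in cleaned):
--         return False
--     n = 0
--     for col in zip(*cleaned):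
--         if any(ch != col[0] for ch in col):
--             break
--         n += 1
--     return n >= 2
-- ===== Notes on version B (the rewrite author's own statement) =====
-- stated objective: idiomatic
-- what changed: Replaces the per-string prefix-shrinking loop (repeatedly chopping the candidate prefix from the right for each value) with a single column-major pass over zip(*cleaned) that counts leading uniform columns and compares the count with 2.
import Mathlib
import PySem

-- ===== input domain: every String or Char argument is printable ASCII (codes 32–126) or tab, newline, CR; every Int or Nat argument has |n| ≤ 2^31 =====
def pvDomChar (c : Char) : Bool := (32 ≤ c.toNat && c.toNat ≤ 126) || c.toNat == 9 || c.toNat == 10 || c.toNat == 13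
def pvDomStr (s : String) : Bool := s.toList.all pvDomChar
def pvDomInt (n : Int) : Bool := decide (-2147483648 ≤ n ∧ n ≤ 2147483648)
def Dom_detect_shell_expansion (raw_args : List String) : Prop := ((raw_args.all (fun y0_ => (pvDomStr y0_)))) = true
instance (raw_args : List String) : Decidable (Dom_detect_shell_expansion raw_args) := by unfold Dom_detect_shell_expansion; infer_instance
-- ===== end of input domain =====

-- B replaces A's per-string prefix-shrinking loop by one column-major pass that counts
-- leading uniform columns of zip(*cleaned); objective: more idiomatic, same cost class.


-- ===== PORT A =====
-- inner while loop of _common_prefix: while not val.startswith(prefix) and prefix: prefix = prefix[:-1]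
-- (str.startswith on char lists = List.isPrefixOf, prefix[:-1] = dropLast; exact on all strings)
def pyShrink (v p : List Char) : List Char :=
  if ¬ (p.isPrefixOf v) ∧ p ≠ [] then pyShrink v p.dropLast else p
termination_by p.length
decreasing_by
  rename_i h
  have : 0 < p.length := List.length_pos_of_ne_nil h.2
  simp [List.length_dropLast]; omega

-- the for-loop of _common_prefix, with its early break once the prefix is empty
def prefLoopA : List (List Char) → List Char → List Char
  | [], p => p
  | v :: rest, p =>
      let p' := pyShrink v p
      if p' = [] then p' else prefLoopA rest p'

-- _common_prefix
def commonPrefixA (values : List (List Char)) : List Char :=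
  match values with
  | [] => []
  | v :: rest => prefLoopA rest v

def detect_shell_expansion (raw_args : List String) : Bool :=
  if raw_args.length < 2 then false
  else
    let cleaned := raw_args.filter (fun a => a ≠ "")
    if cleaned.any (fun a => a.toList.contains '^' || a.toList.contains '~' || a.toList.contains ':') then false
    else
      let pre := commonPrefixA (cleaned.map (·.toList))
      decide (pre ≠ []) && decide (2 ≤ pre.length)

-- ===== PORT B =====
-- the for-loop over zip(*cleaned): step column by column (heads), stop when some string is
-- exhausted or a column is not uniform, counting matched columns in n
def colLoopB : List (List Char) → Nat → Nat
  | [], n => n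
  | c :: rest, n =>
    match c with
    | [] => n
    | a :: ctail =>
      if rest.any (fun l => l.isEmpty) then n
      else if rest.all (fun l => l.headD a = a) then
        colLoopB (ctail :: rest.map List.tail) (n + 1)
      else n
termination_by cs _ => (cs.headD []).length
decreasing_by simp

def detect_shell_expansion_alt (raw_args : List String) : Bool :=
  if raw_args.length < 2 then false
  else
    let cleaned := raw_args.filter (fun a => a ≠ "")
    if cleaned.any (fun a => a.toList.contains '^' || a.toList.contains '~' || a.toList.contains ':') then false
    else decide (2 ≤ colLoopB (cleaned.map (·.toList)) 0)

-- ===== PRECONDITION & SPEC =====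
def Spec_detect_shell_expansion (raw_args : List String) (out : Bool) : Prop := out = detect_shell_expansion_alt raw_args
instance (raw_args : List String) (out : Bool) : Decidable (Spec_detect_shell_expansion raw_args out) := by unfold Spec_detect_shell_expansion; infer_instance

-- ===== CLAIM (what is proved, stated in full; the proofs are below) =====
def Claim_equal_detect_shell_expansion : Prop := ∀ (raw_args : List String), Dom_detect_shell_expansion raw_args → Spec_detect_shell_expansion raw_args (detect_shell_expansion raw_args)

-- ===== LEMMAS AND PROOFS =====

/-- longest common prefix of two char lists -/
def lcp : List Char → List Char → List Char
  | a :: as, b :: bs => if a = b then a :: lcp as bs else []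
  | _, _ => []

theorem lcp_nil_left (w : List Char) : lcp [] w = [] := by cases w <;> rfl

theorem lcp_nil_right (p : List Char) : lcp p [] = [] := by cases p <;> rfl

theorem lcp_prefix_left (p w : List Char) : lcp p w <+: p := by
  induction p generalizing w with
  | nil => simp [lcp_nil_left]
  | cons a as ih =>
    cases w with
    | nil => simp [lcp_nil_right]
    | cons b bs =>
      simp only [lcp]
      split
      · exact List.cons_prefix_cons.mpr ⟨rfl, ih bs⟩
      · simp

theorem lcp_mono {x p : List Char} (w : List Char) (h : x <+: p) : lcp x w <+: lcp p w := by
  induction x generalizing p w with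
  | nil => simp [lcp_nil_left]
  | cons a as ih =>
    cases p with
    | nil => simp at h
    | cons b bs =>
      obtain ⟨hab, hpre⟩ := List.cons_prefix_cons.mp h
      subst hab
      cases w with
      | nil => simp [lcp_nil_right]
      | cons c cs =>
        simp only [lcp]
        split
        · exact List.cons_prefix_cons.mpr ⟨rfl, ih cs hpre⟩
        · simp

theorem lcp_of_prefix {p v : List Char} (h : p <+: v) : lcp p v = p := by
  induction p generalizing v with
  | nil => simp [lcp_nil_left]
  | cons a as ih =>
    cases v with
    | nil => simp at h
    | cons b bs =>
      obtain ⟨hab, hpre⟩ := List.cons_prefix_cons.mp h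
      subst hab
      simp [lcp, ih hpre]

theorem lcp_dropLast {p v : List Char} (h : ¬ p <+: v) : lcp p v = lcp p.dropLast v := by
  induction p generalizing v with
  | nil => simp at h
  | cons a as ih =>
    cases v with
    | nil => simp [lcp_nil_right]
    | cons b bs =>
      by_cases hab : a = b
      · subst hab
        have has : as ≠ [] := by rintro rfl; exact h (by simp)
        have hnp : ¬ as <+: bs := fun hp => h (List.cons_prefix_cons.mpr ⟨rfl, hp⟩)
        rw [List.dropLast_cons_of_ne_nil has]
        simp [lcp, ih hnp]
      · cases has : as with
        | nil => simp [lcp, hab, lcp_nil_left]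
        | cons x xs =>
          rw [← has, List.dropLast_cons_of_ne_nil (by simp [has])]
          simp [lcp, hab]

theorem shrink_eq_lcp (v p : List Char) : pyShrink v p = lcp p v := by
  induction p using pyShrink.induct v with
  | case1 p hcond ih =>
    rw [pyShrink, if_pos hcond, ih]
    exact (lcp_dropLast (by simpa using hcond.1)).symm
  | case2 p hcond =>
    rw [pyShrink, if_neg hcond]
    rcases not_and_or.mp hcond with h | h
    · exact (lcp_of_prefix (by simpa using not_not.mp h)).symm
    · rw [not_not.mp h]; simp [lcp_nil_left]

theorem foldl_lcp_nil (vs : List (List Char)) : List.foldl lcp [] vs = [] := by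
  induction vs with
  | nil => rfl
  | cons w ws ih => simpa [List.foldl, lcp_nil_left] using ih

theorem prefLoopA_eq (vs : List (List Char)) (p : List Char) :
    prefLoopA vs p = List.foldl lcp p vs := by
  induction vs generalizing p with
  | nil => rfl
  | cons v rest ih =>
    simp only [prefLoopA, List.foldl, shrink_eq_lcp]
    split
    · rename_i h; simp [h, foldl_lcp_nil]
    · exact ih _

theorem foldl_lcp_prefix (vs : List (List Char)) (p : List Char) :
    List.foldl lcp p vs <+: p := by
  induction vs generalizing p with
  | nil => simp
  | cons w ws ih => exact (ih (lcp p w)).trans (lcp_prefix_left p w)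

theorem foldl_lcp_mem {w : List Char} {vs : List (List Char)} (hm : w ∈ vs) (p : List Char) :
    List.foldl lcp p vs <+: lcp p w := by
  induction vs generalizing p with
  | nil => simp at hm
  | cons u us ih =>
    rcases List.mem_cons.mp hm with rfl | hm'
    · exact (foldl_lcp_prefix us (lcp p w)).trans (List.prefix_refl _)
    · exact (ih hm' (lcp p u)).trans (lcp_mono w (lcp_prefix_left p u))

theorem foldl_lcp_cons {a : Char} (x : List Char) (vs : List (List Char))
    (h : ∀ w ∈ vs, ∃ w', w = a :: w') :
    List.foldl lcp (a :: x) vs = a :: List.foldl lcp x (vs.map List.tail) := by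
  induction vs generalizing x with
  | nil => rfl
  | cons w ws ih =>
    obtain ⟨w', rfl⟩ := h w (by simp)
    simp only [List.foldl, List.map, List.tail_cons, lcp]
    exact ih _ (fun u hu => h u (by simp [hu]))

theorem colLoopB_eq (v : List Char) (vs : List (List Char)) (n : Nat) :
    colLoopB (v :: vs) n = n + (List.foldl lcp v vs).length := by
  induction v generalizing vs n with
  | nil => simp [colLoopB, foldl_lcp_nil]
  | cons a v' ih =>
    rw [colLoopB]
    split
    · rename_i hemp
      obtain ⟨w, hw, hwe⟩ := List.any_eq_true.mp hemp
      have : List.foldl lcp (a :: v') vs <+: lcp (a :: v') w := foldl_lcp_mem hw _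
      rw [List.isEmpty_iff.mp hwe, lcp_nil_right] at this
      simp [List.prefix_nil.mp this]
    · split
      · rename_i hemp hall
        have hcons : ∀ w ∈ vs, ∃ w', w = a :: w' := by
          intro w hw
          cases w with
          | nil => exact absurd (List.any_eq_true.mpr ⟨[], hw, rfl⟩) hemp
          | cons b bs =>
            have := List.all_eq_true.mp hall _ hw
            simp at this
            exact ⟨bs, by rw [this]⟩
        rw [ih (vs.map List.tail) (n + 1), foldl_lcp_cons v' vs hcons]
        simp; omega
      · rename_i hemp hall
        have hx : ∃ w ∈ vs, w.headD a ≠ a := by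
          by_contra hc
          refine hall (List.all_eq_true.mpr fun w hw => ?_)
          simp only [not_exists, not_and] at hc
          simpa using hc w hw
        obtain ⟨w, hw, hne⟩ := hx
        have hpre : List.foldl lcp (a :: v') vs <+: lcp (a :: v') w := foldl_lcp_mem hw _
        cases w with
        | nil => exact absurd (List.any_eq_true.mpr ⟨[], hw, rfl⟩) hemp
        | cons b bs =>
          have hab : a ≠ b := by
            intro h; apply hne; simp [List.headD, h]
          rw [lcp, if_neg hab] at hpre
          simp [List.prefix_nil.mp hpre]

theorem common_eq (L : List (List Char)) :
    colLoopB L 0 = (commonPrefixA L).length := by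
  cases L with
  | nil => simp [colLoopB, commonPrefixA]
  | cons v vs => rw [commonPrefixA, prefLoopA_eq, colLoopB_eq]; simp

-- ===== VERDICT (by name: the statement is the Claim_ definition above) =====
theorem nonempty_of_two_le (p : List Char) :
    (decide (p ≠ []) && decide (2 ≤ p.length)) = decide (2 ≤ p.length) := by
  cases p <;> simp

theorem detect_shell_expansion_spec : Claim_equal_detect_shell_expansion := by
  intro raw_args _
  unfold Spec_detect_shell_expansion
  simp only [detect_shell_expansion, detect_shell_expansion_alt]
  split
  · rfl
  · split
    · rfl
    · rw [common_eq]
      exact nonempty_of_two_le _
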